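-- pv_equiv track=rewrite | github.com/miclaldogan/bantz | src/bantz/router/engine.py | _select_best_scan_text_match
-- ===== SOURCE A (Python) =====
-- from typing import Optional, Callable, Awaitable
--
-- def _select_best_scan_text_match(elements: list[dict], needle: str) -> Optional[dict]:
--     """Pick the best scan element for a click-by-text request.
--
--     Strategy:
--     1) Exact case-insensitive match
--     2) Startswith match
--     3) Contains match
--
--     Ties are resolved by shorter element text.
--     """
--
--     n = str(needle or "").strip().casefold()
--     if not n:
--         return None
--
--     best: dict | None = None
--     best_score: int | None = None
--     best_len: int | None = None
--
--     for e in elements: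
--         t_raw = str(e.get("text") or "").strip()
--         t = t_raw.casefold()
--         if not t:
--             continue
--
--         score: int | None
--         if t == n:
--             score = 0
--         elif t.startswith(n):
--             score = 1
--         elif n in t:
--             score = 2
--         else:
--             score = None
--
--         if score is None:
--             continue
--
--         tlen = len(t_raw)
--         if best is None:
--             best = e
--             best_score = score
--             best_len = tlen
--             continue
--
--         if best_score is None or score < best_score:
--             best = e
--             best_score = score
--             best_len = tlen
--             continue
--
--         if score == best_score and best_len is not None and tlen < best_len:
--             best = e
--             best_len = tlen
--
--     return best
-- ===== SOURCE B (Python) =====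
-- from typing import Optional
--
--
-- def _select_best_scan_text_match(elements: list[dict], needle: str) -> Optional[dict]:
--     """Tiered search: try exact matches first, then prefix matches, then
--     substring matches; within a tier pick the shortest stripped text,
--     earliest element on ties."""
--     n = str(needle or "").strip().casefold()
--     if not n:
--         return None
--
--     def is_exact(t):
--         return t == n
--
--     def is_prefix(t):
--         return t.startswith(n) and t != n
--
--     def is_substr(t):
--         return n in t and not t.startswith(n)
--
--     for pred in (is_exact, is_prefix, is_substr):
--         best = None
--         best_len = None
--         for e in elements:
--             t_raw = str(e.get("text") or "").strip()
--             t = t_raw.casefold()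
--             if t and pred(t):
--                 if best is None or len(t_raw) < best_len:
--                     best = e
--                     best_len = len(t_raw)
--         if best is not None:
--             return best
--     return None
-- ===== Notes on version B (the rewrite author's own statement) =====
-- stated objective: alternative
-- what changed: Replaces A's single pass tracking a lexicographic (score,length) running best with a tiered search: three staged scans (exact, then proper-prefix, then substring-not-prefix), each returning the shortest stripped text (earliest on ties), stopping at the first tier that yields a hit.
import Mathlib
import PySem

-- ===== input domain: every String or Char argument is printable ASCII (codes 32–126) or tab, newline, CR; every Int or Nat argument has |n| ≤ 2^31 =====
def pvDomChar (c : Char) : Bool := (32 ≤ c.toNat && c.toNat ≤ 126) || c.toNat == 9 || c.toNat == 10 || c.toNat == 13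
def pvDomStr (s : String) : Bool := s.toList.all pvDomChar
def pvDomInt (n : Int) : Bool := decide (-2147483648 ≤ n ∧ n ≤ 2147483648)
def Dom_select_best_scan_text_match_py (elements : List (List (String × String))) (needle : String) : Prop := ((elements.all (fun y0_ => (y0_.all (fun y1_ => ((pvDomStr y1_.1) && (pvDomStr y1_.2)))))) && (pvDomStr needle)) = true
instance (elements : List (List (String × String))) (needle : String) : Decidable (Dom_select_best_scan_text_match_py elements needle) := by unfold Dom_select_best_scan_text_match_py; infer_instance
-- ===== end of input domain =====

-- B replaces A's single-pass lexicographic running best with three staged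
-- tier scans (exact / proper prefix / substring), each keeping the shortest
-- text (objective: alternative).


-- ===== PORT A =====
-- casefold is ported as PySem.Str.lower: exact on the ASCII domain of these theorems.
-- loop body of A: state (best, best_score, best_len)
def pvA_step (n : String)
    (st : Option (List (String × String)) × Option Int × Option Int)
    (e : List (String × String)) :
    Option (List (String × String)) × Option Int × Option Int :=
  let t_raw := PySem.Str.strip (((PySem.Dict.mk e).get? "text").getD "")
  let t := PySem.Str.lower t_raw
  if t = "" then st
  else
    let score : Option Int :=
      if t = n then some 0
      else if PySem.Str.startswith t n then some 1
      else if PySem.Str.isIn n t then some 2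
      else none
    match score with
    | none => st
    | some s =>
      let tlen : Int := PySem.Str.len t_raw
      match st with
      | (none, _, _) => (some e, some s, some tlen)
      | (some b, bs, bl) =>
        match bs with
        | none => (some e, some s, some tlen)
        | some bsc =>
          if s < bsc then (some e, some s, some tlen)
          else
            match bl with
            | none => (some b, some bsc, bl)
            | some bln =>
              if s = bsc ∧ tlen < bln then (some e, some bsc, some tlen)
              else (some b, some bsc, some bln)

def select_best_scan_text_match_py (elements : List (List (String × String))) (needle : String) : Option (List (String × String)) :=
  let n := PySem.Str.lower (PySem.Str.strip needle)
  if n = "" then none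
  else (elements.foldl (pvA_step n) (none, none, none)).1

-- ===== PORT B =====
-- Source B's three tier predicates on the casefolded text
def pvB_pred (n : String) (k : Nat) (t : String) : Bool :=
  match k with
  | 0 => t == n
  | 1 => PySem.Str.startswith t n && !(t == n)
  | _ => PySem.Str.isIn n t && !PySem.Str.startswith t n

-- Source B's inner loop for one tier: shortest stripped text, earliest on ties
-- (best and best_len are always None/set together in Source B: one Option pair)
def pvB_tstep (n : String) (k : Nat)
    (st : Option (List (String × String) × Int))
    (e : List (String × String)) :
    Option (List (String × String) × Int) :=
  let t_raw := PySem.Str.strip (((PySem.Dict.mk e).get? "text").getD "")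
  let t := PySem.Str.lower t_raw
  if t ≠ "" ∧ pvB_pred n k t = true then
    match st with
    | none => some (e, PySem.Str.len t_raw)
    | some (b, bl) =>
      if PySem.Str.len t_raw < bl then some (e, PySem.Str.len t_raw)
      else some (b, bl)
  else st

def pvB_scan (n : String) (k : Nat) (elements : List (List (String × String))) :
    Option (List (String × String)) :=
  (elements.foldl (pvB_tstep n k) none).map Prod.fst

def select_best_scan_text_match_py_alt (elements : List (List (String × String))) (needle : String) : Option (List (String × String)) :=
  let n := PySem.Str.lower (PySem.Str.strip needle)
  if n = "" then none
  else
    match pvB_scan n 0 elements with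
    | some b => some b
    | none =>
      match pvB_scan n 1 elements with
      | some b => some b
      | none =>
        match pvB_scan n 2 elements with
        | some b => some b
        | none => none
-- ===== PRECONDITION & SPEC =====
def Spec_select_best_scan_text_match_py (elements : List (List (String × String))) (needle : String) (out : Option (List (String × String))) : Prop := out = select_best_scan_text_match_py_alt elements needle
instance (elements : List (List (String × String))) (needle : String) (out : Option (List (String × String))) : Decidable (Spec_select_best_scan_text_match_py elements needle out) := by unfold Spec_select_best_scan_text_match_py; infer_instance

-- ===== CLAIM (what is proved, stated in full; the proofs are below) =====
def Claim_equal_select_best_scan_text_match_py : Prop := ∀ (elements : List (List (String × String))) (needle : String), Dom_select_best_scan_text_match_py elements needle → Spec_select_best_scan_text_match_py elements needle (select_best_scan_text_match_py elements needle)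

-- ===== LEMMAS AND PROOFS =====

-- abstraction: A's triple state as a function of the three per-tier states
def pvRepr3 (b0 b1 b2 : Option (List (String × String) × Int)) :
    Option (List (String × String)) × Option Int × Option Int :=
  match b0 with
  | some (e, l) => (some e, some 0, some l)
  | none =>
    match b1 with
    | some (e, l) => (some e, some 1, some l)
    | none =>
      match b2 with
      | some (e, l) => (some e, some 2, some l)
      | none => (none, none, none)

lemma pv_startswith_refl (t : String) : PySem.Str.startswith t t = true := by
  simp [PySem.Str.startswith_eq, PySem.Chars.startswith_iff]

-- step lemma: A's step on the abstracted state = abstraction of tier steps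
lemma pvStep3 (n : String) (b0 b1 b2 : Option (List (String × String) × Int))
    (e : List (String × String)) :
    pvA_step n (pvRepr3 b0 b1 b2) e =
      pvRepr3 (pvB_tstep n 0 b0 e) (pvB_tstep n 1 b1 e) (pvB_tstep n 2 b2 e) := by
  unfold pvA_step pvB_tstep pvB_pred
  dsimp only
  generalize PySem.Str.strip (((PySem.Dict.mk e).get? "text").getD "") = t_raw
  generalize hG : PySem.Str.lower t_raw = t
  by_cases ht : t = ""
  · simp [ht]
  · simp only [ht, if_false, ne_eq, not_false_iff, true_and]
    by_cases h0 : t = n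
    · have hsw : PySem.Str.startswith t n = true := h0 ▸ pv_startswith_refl t
      simp only [h0, if_true, beq_self_eq_true, hsw, Bool.not_true, Bool.and_false]
      rcases b0 with _ | ⟨e0, l0⟩ <;> rcases b1 with _ | ⟨e1, l1⟩ <;>
        rcases b2 with _ | ⟨e2, l2⟩ <;>
        simp_all [pvRepr3] <;> split_ifs <;> simp_all [pvRepr3] <;> omega
    · by_cases h1 : PySem.Str.startswith t n = true
      · simp only [h0, if_false, h1, if_true, beq_iff_eq, Bool.not_eq_true']
        have hb : (t == n) = false := by simp [h0]
        simp only [hb, Bool.not_false, Bool.and_true, Bool.true_and]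
        rcases b0 with _ | ⟨e0, l0⟩ <;> rcases b1 with _ | ⟨e1, l1⟩ <;>
          rcases b2 with _ | ⟨e2, l2⟩ <;>
          simp_all [pvRepr3] <;> split_ifs <;> simp_all [pvRepr3] <;> omega
      · by_cases h2 : PySem.Str.isIn n t = true
        · simp only [h0, if_false, h1, if_false, h2, if_true]
          have hb : (t == n) = false := by simp [h0]
          simp only [hb, h1, Bool.not_false, Bool.and_false, Bool.false_and,
            Bool.and_true, Bool.true_and, Bool.not_eq_true] at *
          rcases b0 with _ | ⟨e0, l0⟩ <;> rcases b1 with _ | ⟨e1, l1⟩ <;>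
            rcases b2 with _ | ⟨e2, l2⟩ <;>
            simp_all [pvRepr3] <;> split_ifs <;> simp_all [pvRepr3] <;> omega
        · have hb : (t == n) = false := by simp [h0]
          simp only [h0, if_false, h1, if_false, h2, if_false, hb,
            Bool.not_false, Bool.and_true, Bool.true_and, Bool.and_false]
          simp only [Bool.not_eq_true] at h1 h2
          simp [h1, h2]

lemma pv_fold3 (n : String) (es : List (List (String × String)))
    (b0 b1 b2 : Option (List (String × String) × Int)) :
    es.foldl (pvA_step n) (pvRepr3 b0 b1 b2) =
      pvRepr3 (es.foldl (pvB_tstep n 0) b0) (es.foldl (pvB_tstep n 1) b1)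
        (es.foldl (pvB_tstep n 2) b2) := by
  induction es generalizing b0 b1 b2 with
  | nil => rfl
  | cons e es ih =>
    simp only [List.foldl_cons]
    rw [pvStep3 n b0 b1 b2 e]
    exact ih _ _ _

-- ===== VERDICT (by name: the statement is the Claim_ definition above) =====
theorem select_best_scan_text_match_py_spec : Claim_equal_select_best_scan_text_match_py := by
  intro elements needle _
  unfold Spec_select_best_scan_text_match_py select_best_scan_text_match_py select_best_scan_text_match_py_alt
  by_cases hn : PySem.Str.lower (PySem.Str.strip needle) = ""
  · simp [hn]
  · simp only [hn, if_false]
    have h := pv_fold3 (PySem.Str.lower (PySem.Str.strip needle)) elements none none none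
    simp only [pvRepr3] at h
    rw [h]
    unfold pvB_scan
    rcases elements.foldl (pvB_tstep (PySem.Str.lower (PySem.Str.strip needle)) 0) none with _ | ⟨a0, l0⟩ <;>
      rcases elements.foldl (pvB_tstep (PySem.Str.lower (PySem.Str.strip needle)) 1) none with _ | ⟨a1, l1⟩ <;>
        rcases elements.foldl (pvB_tstep (PySem.Str.lower (PySem.Str.strip needle)) 2) none with _ | ⟨a2, l2⟩ <;>
          simp [pvRepr3]
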